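-- pv_equiv track=rewrite | github.com/baditaflorin/ServerClaw | platform/goal_compiler/batch.py | _dominant_access
-- ===== SOURCE A (Python) =====
-- def _dominant_access(accesses: set[str]) -> str:
--     normalized = {item.strip().lower() for item in accesses if item}
--     if "exclusive" in normalized:
--         return "exclusive"
--     if "write" in normalized:
--         return "write"
--     if "read" in normalized:
--         return "read"
--     return "unknown"
-- ===== SOURCE B (Python) =====
-- _RANK = {"exclusive": 3, "write": 2, "read": 1}
-- _NAME = {3: "exclusive", 2: "write", 1: "read"}
--
--
-- def _dominant_access(accesses: set[str]) -> str:
--     best = 0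
--     for item in accesses:
--         if item:
--             best = max(best, _RANK.get(item.strip().lower(), 0))
--     return _NAME.get(best, "unknown")
-- ===== Notes on version B (the rewrite author's own statement) =====
-- stated objective: alternative
-- what changed: Replaces the set comprehension plus three membership probes with a single pass that keeps the running maximum priority rank (exclusive=3, write=2, read=1) and translates the best rank back to its label, 'unknown' for rank 0.
import Mathlib
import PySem

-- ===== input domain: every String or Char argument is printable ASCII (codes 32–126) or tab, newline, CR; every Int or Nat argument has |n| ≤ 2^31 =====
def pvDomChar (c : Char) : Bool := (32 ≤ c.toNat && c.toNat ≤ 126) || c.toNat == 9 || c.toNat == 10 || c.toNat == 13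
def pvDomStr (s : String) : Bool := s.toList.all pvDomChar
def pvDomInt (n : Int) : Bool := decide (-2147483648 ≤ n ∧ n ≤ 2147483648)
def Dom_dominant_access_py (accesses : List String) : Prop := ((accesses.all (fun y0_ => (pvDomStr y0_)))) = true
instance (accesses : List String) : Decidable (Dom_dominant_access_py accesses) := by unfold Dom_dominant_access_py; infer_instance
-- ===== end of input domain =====

-- B keeps a single running maximum priority rank in one pass instead of building a set and probing it three times (objective: alternative).

-- ===== PORT A =====
def dominant_access_py (accesses : List String) : String :=
  let normalized : PySem.Set String :=
    PySem.Set.ofList ((accesses.filter (fun item => item ≠ "")).map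
      (fun item => PySem.Str.lower (PySem.Str.strip item)))
  if PySem.Set.contains normalized "exclusive" then "exclusive"
  else if PySem.Set.contains normalized "write" then "write"
  else if PySem.Set.contains normalized "read" then "read"
  else "unknown"

-- ===== PORT B =====
def pvRankDict : PySem.Dict String Int :=
  PySem.Dict.ofList [("exclusive", 3), ("write", 2), ("read", 1)]

def pvNameDict : PySem.Dict Int String :=
  PySem.Dict.ofList [(3, "exclusive"), (2, "write"), (1, "read")]

def dominant_access_py_alt (accesses : List String) : String :=
  let best : Int := accesses.foldl (fun best item =>
    if item ≠ "" then
      max best (PySem.Dict.getD pvRankDict (PySem.Str.lower (PySem.Str.strip item)) 0)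
    else best) 0
  PySem.Dict.getD pvNameDict best "unknown"

-- ===== PRECONDITION & SPEC =====
def Spec_dominant_access_py (accesses : List String) (out : String) : Prop := out = dominant_access_py_alt accesses
instance (accesses : List String) (out : String) : Decidable (Spec_dominant_access_py accesses out) := by unfold Spec_dominant_access_py; infer_instance

-- ===== CLAIM (what is proved, stated in full; the proofs are below) =====
def Claim_equal_dominant_access_py : Prop := ∀ (accesses : List String), Dom_dominant_access_py accesses → Spec_dominant_access_py accesses (dominant_access_py accesses)

-- ===== LEMMAS AND PROOFS =====

def pvNorm (s : String) : String := PySem.Str.lower (PySem.Str.strip s)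

def pvRank (s : String) : Int := PySem.Dict.getD pvRankDict s 0

def pvStep (b : Int) (item : String) : Int :=
  if item ≠ "" then max b (pvRank (pvNorm item)) else b

def pvBest (l : List String) : Int := l.foldl pvStep 0

theorem pvRank_eq (s : String) :
    pvRank s = if s = "exclusive" then 3 else if s = "write" then 2 else if s = "read" then 1 else 0 := by
  have h : pvRankDict = ((PySem.Dict.empty.insert "exclusive" 3).insert "write" 2).insert "read" 1 := by decide
  rw [pvRank, h]
  simp [PySem.Dict.getD_insert, PySem.Dict.getD_empty]
  split_ifs <;> simp_all

theorem pvRank_nonneg (s : String) : 0 ≤ pvRank s := by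
  rw [pvRank_eq]; split_ifs <;> norm_num

theorem pvRank_le3 (s : String) : pvRank s ≤ 3 := by
  rw [pvRank_eq]; split_ifs <;> norm_num

theorem pvRank3_iff (s : String) : 3 ≤ pvRank s ↔ s = "exclusive" := by
  rw [pvRank_eq]; split_ifs <;> simp_all

theorem pvRank2_iff (s : String) : 2 ≤ pvRank s ↔ s = "exclusive" ∨ s = "write" := by
  rw [pvRank_eq]; split_ifs <;> simp_all

theorem pvRank1_iff (s : String) : 1 ≤ pvRank s ↔ s = "exclusive" ∨ s = "write" ∨ s = "read" := by
  rw [pvRank_eq]; split_ifs <;> simp_all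

theorem pvStep_nonneg (b : Int) (i : String) (hb : 0 ≤ b) : 0 ≤ pvStep b i := by
  unfold pvStep; split_ifs with h
  · exact le_max_of_le_left hb
  · exact hb

theorem pvFold_nonneg (l : List String) : ∀ b : Int, 0 ≤ b → 0 ≤ l.foldl pvStep b := by
  induction l with
  | nil => intro b hb; simpa
  | cons i l ih => intro b hb; exact ih _ (pvStep_nonneg b i hb)

theorem pvFold_shift (l : List String) : ∀ b : Int, 0 ≤ b →
    l.foldl pvStep b = max b (pvBest l) := by
  induction l with
  | nil => intro b hb; simp [pvBest]; omega
  | cons i l ih =>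
    intro b hb
    have h1 : List.foldl pvStep b (i :: l) = List.foldl pvStep (pvStep b i) l := rfl
    have h2 : pvBest (i :: l) = List.foldl pvStep (pvStep 0 i) l := rfl
    rw [h1, h2, ih _ (pvStep_nonneg b i hb), ih _ (pvStep_nonneg 0 i le_rfl)]
    unfold pvStep
    have hr := pvRank_nonneg (pvNorm i)
    have h0 : 0 ≤ pvBest l := pvFold_nonneg l 0 le_rfl
    split_ifs <;> omega

theorem pvBest_nonneg (l : List String) : 0 ≤ pvBest l :=
  pvFold_nonneg l 0 le_rfl

theorem pvBest_le3 (l : List String) : pvBest l ≤ 3 := by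
  induction l with
  | nil => simp [pvBest]
  | cons i l ih =>
    have h2 : pvBest (i :: l) = List.foldl pvStep (pvStep 0 i) l := rfl
    rw [h2, pvFold_shift l _ (pvStep_nonneg 0 i le_rfl)]
    have hr := pvRank_le3 (pvNorm i)
    unfold pvStep; split_ifs <;> omega

theorem pvBest_ge_iff (l : List String) (k : Int) (hk : 1 ≤ k) :
    k ≤ pvBest l ↔ ∃ i ∈ l, i ≠ "" ∧ k ≤ pvRank (pvNorm i) := by
  induction l with
  | nil => simp [pvBest]; omega
  | cons i l ih =>
    have h2 : pvBest (i :: l) = List.foldl pvStep (pvStep 0 i) l := rfl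
    rw [h2, pvFold_shift l _ (pvStep_nonneg 0 i le_rfl), le_max_iff, ih]
    have hr := pvRank_nonneg (pvNorm i)
    constructor
    · rintro (hs | ⟨j, hj, hne, hkr⟩)
      · refine ⟨i, List.mem_cons_self, ?_⟩
        unfold pvStep at hs
        split_ifs at hs with h
        · exact ⟨h, by omega⟩
        · omega
      · exact ⟨j, List.mem_cons_of_mem _ hj, hne, hkr⟩
    · rintro ⟨j, hj, hne, hkr⟩
      rcases List.mem_cons.1 hj with rfl | hj'
      · left; unfold pvStep; rw [if_pos hne]; omega
      · right; exact ⟨j, hj', hne, hkr⟩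

theorem pvMem_iff (l : List String) (x : String) :
    PySem.Set.contains (PySem.Set.ofList ((l.filter (fun item => item ≠ "")).map pvNorm)) x = true ↔
      ∃ i ∈ l, i ≠ "" ∧ pvNorm i = x := by
  rw [PySem.Set.contains_iff, PySem.Set.mem_ofList]
  simp only [List.mem_map, List.mem_filter, decide_eq_true_eq]
  constructor
  · rintro ⟨i, ⟨hi, hne⟩, hx⟩; exact ⟨i, hi, hne, hx⟩
  · rintro ⟨i, hi, hne, hx⟩; exact ⟨i, ⟨hi, hne⟩, hx⟩

theorem dominant_access_py_spec : Claim_equal_dominant_access_py := by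
  intro l _
  show dominant_access_py l = dominant_access_py_alt l
  have halt : dominant_access_py_alt l = PySem.Dict.getD pvNameDict (pvBest l) "unknown" := rfl
  rw [halt]
  have h0 := pvBest_nonneg l
  have h3 := pvBest_le3 l
  have hA : dominant_access_py l =
      (if PySem.Set.contains (PySem.Set.ofList ((l.filter (fun item => item ≠ "")).map pvNorm)) "exclusive" = true then "exclusive"
       else if PySem.Set.contains (PySem.Set.ofList ((l.filter (fun item => item ≠ "")).map pvNorm)) "write" = true then "write"
       else if PySem.Set.contains (PySem.Set.ofList ((l.filter (fun item => item ≠ "")).map pvNorm)) "read" = true then "read"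
       else "unknown") := rfl
  rw [hA]
  split_ifs with c3 c2 c1
  · obtain ⟨i, hi, hne, hnorm⟩ := (pvMem_iff l _).1 c3
    have : 3 ≤ pvBest l := (pvBest_ge_iff l 3 (by norm_num)).2
      ⟨i, hi, hne, (pvRank3_iff _).2 hnorm⟩
    have hb : pvBest l = 3 := by omega
    rw [hb]; decide
  · obtain ⟨i, hi, hne, hnorm⟩ := (pvMem_iff l _).1 c2
    have hge : 2 ≤ pvBest l := (pvBest_ge_iff l 2 (by norm_num)).2
      ⟨i, hi, hne, (pvRank2_iff _).2 (Or.inr hnorm)⟩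
    have hlt : ¬ 3 ≤ pvBest l := by
      intro h
      obtain ⟨j, hj, hjne, hjr⟩ := (pvBest_ge_iff l 3 (by norm_num)).1 h
      exact c3 ((pvMem_iff l _).2 ⟨j, hj, hjne, (pvRank3_iff _).1 hjr⟩)
    have hb : pvBest l = 2 := by omega
    rw [hb]; decide
  · obtain ⟨i, hi, hne, hnorm⟩ := (pvMem_iff l _).1 c1
    have hge : 1 ≤ pvBest l := (pvBest_ge_iff l 1 (by norm_num)).2
      ⟨i, hi, hne, (pvRank1_iff _).2 (Or.inr (Or.inr hnorm))⟩
    have hlt : ¬ 2 ≤ pvBest l := by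
      intro h
      obtain ⟨j, hj, hjne, hjr⟩ := (pvBest_ge_iff l 2 (by norm_num)).1 h
      rcases (pvRank2_iff _).1 hjr with he | hw
      · exact c3 ((pvMem_iff l _).2 ⟨j, hj, hjne, he⟩)
      · exact c2 ((pvMem_iff l _).2 ⟨j, hj, hjne, hw⟩)
    have hb : pvBest l = 1 := by omega
    rw [hb]; decide
  · have hlt : ¬ 1 ≤ pvBest l := by
      intro h
      obtain ⟨j, hj, hjne, hjr⟩ := (pvBest_ge_iff l 1 (by norm_num)).1 h
      rcases (pvRank1_iff _).1 hjr with he | hw | hr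
      · exact c3 ((pvMem_iff l _).2 ⟨j, hj, hjne, he⟩)
      · exact c2 ((pvMem_iff l _).2 ⟨j, hj, hjne, hw⟩)
      · exact c1 ((pvMem_iff l _).2 ⟨j, hj, hjne, hr⟩)
    have hb : pvBest l = 0 := by omega
    rw [hb]; decide
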